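-- pv_equiv track=rewrite | github.com/cytomining/CytoTable | pycytominer_transform/utils.py | column_sort
-- ===== SOURCE A (Python) =====
-- def column_sort(value: str):
--     """
--     A custom sort for column values as a list.
--     To be used with sorted and Pyarrow tables.
--     """
--
--     # lowercase str which will be used for comparisons
--     # to avoid any capitalization challenges
--     value_lower = value.lower()
--
--     # first sorted values (by list index)
--     sort_first = ["tablenumber", "imagenumber"]
--
--     # middle sort value
--     sort_middle = "metadata"
--
--     # sorted last (by list order enumeration)
--     sort_later = [
--         "image",
--         "cytoplasm",
--         "cells",
--         "nuclei",
--     ]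
--
--     # if value is in the sort_first list
--     # return the index from that list
--     if value_lower in sort_first:
--         return sort_first.index(value_lower)
--
--     # if sort_middle is anywhere in value return
--     # next index value after sort_first values
--     elif sort_middle in value_lower:
--         return len(sort_first)
--
--     # if any sort_later are found as the first part of value
--     # return enumerated index of sort_later value (starting from
--     # relative len based on the above conditionals and lists)
--     elif any(value_lower.startswith(val) for val in sort_later):
--         for k, v in enumerate(sort_later, start=len(sort_first) + 1):
--             if value_lower.startswith(v):
--                 return k
--
--     # else we return the total length of all sort values
--     return len(sort_first) + len(sort_later) + 1
-- ===== SOURCE B (Python) =====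
-- RULES = [
--     ("exact", "tablenumber"),
--     ("exact", "imagenumber"),
--     ("contains", "metadata"),
--     ("prefix", "image"),
--     ("prefix", "cytoplasm"),
--     ("prefix", "cells"),
--     ("prefix", "nuclei"),
-- ]
--
--
-- def column_sort(value: str):
--     """Data-driven sort key: first matching rule's index, else len(RULES)."""
--     v = value.lower()
--     for i, (kind, pat) in enumerate(RULES):
--         if (
--             (kind == "exact" and v == pat)
--             or (kind == "contains" and pat in v)
--             or (kind == "prefix" and v.startswith(pat))
--         ):
--             return i
--     return len(RULES)
-- ===== Notes on version B (the rewrite author's own statement) =====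
-- stated objective: simpler
-- what changed: Replaces the three separate branch kinds (membership+index, substring, any+enumerate loop) with a single ordered rule table traversed once, returning the index of the first matching tagged rule or the table length.
import Mathlib
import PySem

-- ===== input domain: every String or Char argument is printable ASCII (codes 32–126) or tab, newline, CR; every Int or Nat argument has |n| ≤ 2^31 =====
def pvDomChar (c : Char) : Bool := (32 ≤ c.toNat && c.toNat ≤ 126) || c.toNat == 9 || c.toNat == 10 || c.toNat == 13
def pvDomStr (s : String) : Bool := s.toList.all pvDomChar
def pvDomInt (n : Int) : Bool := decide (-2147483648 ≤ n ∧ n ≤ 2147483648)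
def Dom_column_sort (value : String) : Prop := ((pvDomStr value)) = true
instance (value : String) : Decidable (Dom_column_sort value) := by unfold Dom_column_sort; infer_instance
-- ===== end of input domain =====

-- B replaces A's three separate branch kinds with one ordered rule table traversed once (objective: simpler).

-- ===== PORT A =====
-- the 'for k, v in enumerate(sort_later, start=3)' loop; falls through to the final return value
def column_sort_later_loop (vl : String) (k : Int) : List String → Int
  | [] => 2 + 4 + 1
  | v :: rest =>
      if PySem.Str.startswith vl v then k else column_sort_later_loop vl (k + 1) rest

def column_sort (value : String) : Int :=
  let value_lower := PySem.Str.lower value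
  let sort_first := ["tablenumber", "imagenumber"]
  let sort_middle := "metadata"
  let sort_later := ["image", "cytoplasm", "cells", "nuclei"]
  if sort_first.contains value_lower then
    ((PySem.List.index? sort_first value_lower).getD 0 : Nat)
  else if PySem.Str.isIn sort_middle value_lower then
    (sort_first.length : Int)
  else if sort_later.any (fun v => PySem.Str.startswith value_lower v) then
    column_sort_later_loop value_lower (sort_first.length + 1) sort_later
  else
    (sort_first.length : Int) + (sort_later.length : Int) + 1

-- ===== PORT B =====
def column_sort_rules : List (String × String) :=
  [("exact", "tablenumber"),
   ("exact", "imagenumber"),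
   ("contains", "metadata"),
   ("prefix", "image"),
   ("prefix", "cytoplasm"),
   ("prefix", "cells"),
   ("prefix", "nuclei")]

def column_sort_rule_matches (v : String) (kind pat : String) : Bool :=
  (kind == "exact" && v == pat)
    || (kind == "contains" && PySem.Str.isIn pat v)
    || (kind == "prefix" && PySem.Str.startswith v pat)

-- the enumerate loop over the rule table; none = fell through
def column_sort_alt_loop (v : String) (i : Int) : List (String × String) → Option Int
  | [] => none
  | (kind, pat) :: rest =>
      if column_sort_rule_matches v kind pat then some i
      else column_sort_alt_loop v (i + 1) rest

def column_sort_alt (value : String) : Int :=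
  let v := PySem.Str.lower value
  match column_sort_alt_loop v 0 column_sort_rules with
  | some i => i
  | none => (column_sort_rules.length : Int)

-- ===== PRECONDITION & SPEC =====
def Spec_column_sort (value : String) (out : Int) : Prop := out = column_sort_alt value
instance (value : String) (out : Int) : Decidable (Spec_column_sort value out) := by unfold Spec_column_sort; infer_instance

-- ===== CLAIM (what is proved, stated in full; the proofs are below) =====
def Claim_equal_column_sort : Prop := ∀ (value : String), Dom_column_sort value → Spec_column_sort value (column_sort value)

-- ===== LEMMAS AND PROOFS =====

-- ===== VERDICT (by name: the statement is the Claim_ definition above) =====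
set_option maxHeartbeats 2000000 in
theorem column_sort_spec : Claim_equal_column_sort := by
  intro value _
  unfold Spec_column_sort column_sort column_sort_alt
  simp only [column_sort_rules, column_sort_alt_loop, column_sort_rule_matches,
    column_sort_later_loop, List.contains_cons, List.contains_nil, List.any_cons,
    List.any_nil, PySem.List.index?_eq_idxOf?]
  split_ifs <;> simp_all [List.idxOf?] <;> decide
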